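-- pv_equiv track=rewrite | github.com/dwiraamadhan/Backend-AI-Voice-Generator | functions/questions_answer.py | separate_brackets
-- ===== SOURCE A (Python) =====
-- def separate_brackets(string):
--     new_string = ""
--     for char in string:
--         if char in ["[", "]"]:
--             new_string += " " + char + " "
--         else:
--             new_string += char
--     return new_string
-- ===== SOURCE B (Python) =====
-- def separate_brackets(string):
--     return string.replace("[", " [ ").replace("]", " ] ")
-- ===== Notes on version B (the rewrite author's own statement) =====
-- stated objective: idiomatic
-- what changed: Replaced the per-character branching loop with quadratic string concatenation by two whole-string str.replace passes (safe since neither padded replacement contains the other bracket).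
import Mathlib
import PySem

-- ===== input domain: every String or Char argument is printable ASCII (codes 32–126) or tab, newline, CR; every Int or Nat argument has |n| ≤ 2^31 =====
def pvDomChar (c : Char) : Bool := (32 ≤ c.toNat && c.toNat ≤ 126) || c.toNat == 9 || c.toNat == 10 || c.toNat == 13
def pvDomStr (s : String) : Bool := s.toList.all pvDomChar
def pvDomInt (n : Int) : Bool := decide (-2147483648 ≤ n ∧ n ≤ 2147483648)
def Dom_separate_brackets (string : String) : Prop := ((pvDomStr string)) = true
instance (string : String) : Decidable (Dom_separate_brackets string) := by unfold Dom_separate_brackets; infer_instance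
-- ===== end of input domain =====

-- B replaces A's per-character branching loop with two whole-string replace passes (idiomatic).

-- ===== PORT A =====
-- character loop with string accumulator, branches in A's order
def separate_brackets (string : String) : String :=
  string.toList.foldl
    (fun new_string char =>
      if char ∈ ['[', ']'] then new_string ++ " " ++ String.ofList [char] ++ " "
      else new_string ++ String.ofList [char])
    ""

-- ===== PORT B =====
-- two sequential whole-string replacement passes
def separate_brackets_alt (string : String) : String :=
  PySem.Str.replace (PySem.Str.replace string "[" " [ ") "]" " ] "

-- ===== PRECONDITION & SPEC =====
def Spec_separate_brackets (string : String) (out : String) : Prop := out = separate_brackets_alt string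
instance (string : String) (out : String) : Decidable (Spec_separate_brackets string out) := by unfold Spec_separate_brackets; infer_instance

-- ===== CLAIM (what is proved, stated in full; the proofs are below) =====
def Claim_equal_separate_brackets : Prop := ∀ (string : String), Dom_separate_brackets string → Spec_separate_brackets string (separate_brackets string)

-- ===== LEMMAS AND PROOFS =====

-- single-character replace is a flatMap
theorem replace_go_single (a : Char) (new : List Char) :
    ∀ (s : List Char) (fuel : Nat) (acc : List Char), s.length ≤ fuel →
      PySem.Chars.replace.go [a] new fuel s acc
        = acc.reverse ++ s.flatMap (fun c => if c = a then new else [c]) := by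
  intro s
  induction s with
  | nil =>
      intro fuel acc _
      cases fuel <;> simp [PySem.Chars.replace.go]
  | cons c t ih =>
      intro fuel acc hle
      cases fuel with
      | zero => simp at hle
      | succ n =>
        simp only [PySem.Chars.replace.go]
        by_cases hca : c = a
        · subst hca
          have hpre : List.isPrefixOf [c] (c :: t) = true := by
            simp [List.isPrefixOf]
          rw [hpre]
          simp only [if_true, List.length_cons, List.length_nil, List.drop_succ_cons,
            List.drop_zero, List.flatMap_cons]
          rw [ih n (new.reverse ++ acc) (by simpa using Nat.le_of_succ_le_succ hle)]
          simp
        · have hpre : List.isPrefixOf [a] (c :: t) = false := by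
            simp [List.isPrefixOf]
            intro h; exact absurd h.symm hca
          rw [hpre]
          simp only [Bool.false_eq_true, if_false, List.flatMap_cons, if_neg hca]
          rw [ih n (c :: acc) (by simpa using Nat.le_of_succ_le_succ hle)]
          simp

theorem replace_single (s : List Char) (a : Char) (new : List Char) :
    PySem.Chars.replace s [a] new = s.flatMap (fun c => if c = a then new else [c]) := by
  unfold PySem.Chars.replace
  simp only [List.isEmpty_cons, Bool.false_eq_true, if_false]
  simpa using replace_go_single a new s s.length [] (le_refl _)

-- A's fold, characterized as a flatMap
theorem foldA_eq (l : List Char) :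
    ∀ acc : String,
      l.foldl (fun new_string char =>
        if char ∈ ['[', ']'] then new_string ++ " " ++ String.ofList [char] ++ " "
        else new_string ++ String.ofList [char]) acc
      = acc ++ String.ofList (l.flatMap (fun c =>
          if c = '[' ∨ c = ']' then [' ', c, ' '] else [c])) := by
  induction l with
  | nil => intro acc; simp
  | cons c t ih =>
      intro acc
      simp only [List.foldl_cons, List.flatMap_cons, ih]
      by_cases h : c = '[' ∨ c = ']'
      · rw [if_pos (by simpa using h), if_pos h]
        apply String.ext
        simp [String.toList_append]
      · rw [if_neg (by simpa using h), if_neg h]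
        apply String.ext
        simp [String.toList_append]

-- ===== VERDICT (by name: the statement is the Claim_ definition above) =====
theorem separate_brackets_spec : Claim_equal_separate_brackets := by
  intro s _
  show separate_brackets s = separate_brackets_alt s
  unfold separate_brackets separate_brackets_alt PySem.Str.replace
  rw [foldA_eq]
  apply String.ext
  simp only [String.toList_append, String.toList_ofList]
  have h1 : ("[" : String).toList = ['['] := rfl
  have h2 : ("]" : String).toList = [']'] := rfl
  rw [h1, h2, replace_single]
  rw [replace_single]
  rw [List.flatMap_assoc]
  rw [show ("" : String).toList = [] from rfl, List.nil_append]
  apply List.flatMap_congr  -- pointwise equality of the composed step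
  intro c _
  by_cases h : c = '[' ∨ c = ']'
  · rcases h with h | h <;> subst h <;> rfl
  · rw [not_or] at h
    simp [List.flatMap_cons, h.1, h.2]
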